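-- pv_equiv track=rewrite | github.com/eliottcassidy2000/math | 04-computation/partition_bridge_23.py | hook_lengths
-- ===== SOURCE A (Python) =====
-- def hook_lengths(partition):
--     """Compute all hook lengths for a partition."""
--     hooks = []
--     n = len(partition)
--     for i in range(n):
--         for j in range(partition[i]):
--             # arm length: boxes to the right in same row
--             arm = partition[i] - j - 1
--             # leg length: boxes below in same column
--             leg = sum(1 for k in range(i+1, n) if partition[k] > j)
--             hooks.append(arm + leg + 1)
--     return hooks
-- ===== SOURCE B (Python) =====
-- def hook_lengths(partition):
--     """Compute all hook lengths for a partition.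
--
--     Per row, sort the suffix once and sweep a pointer over it as the
--     column index grows, instead of re-scanning the suffix for every cell.
--     """
--     hooks = []
--     n = len(partition)
--     for i in range(n):
--         m = partition[i]
--         tail = sorted(partition[i+1:])
--         L = len(tail)
--         p = 0
--         for j in range(m):
--             while p < L and tail[p] <= j:
--                 p += 1
--             # arm + leg + 1 = (m - j - 1) + (L - p) + 1
--             hooks.append(m - j + L - p)
--     return hooks
-- ===== Notes on version B (the rewrite author's own statement) =====
-- stated objective: faster
-- what changed: Per row, B sorts the suffix once and sweeps a single pointer over it as the column index grows, replacing A's per-cell rescan of the whole suffix.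
import Mathlib
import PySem

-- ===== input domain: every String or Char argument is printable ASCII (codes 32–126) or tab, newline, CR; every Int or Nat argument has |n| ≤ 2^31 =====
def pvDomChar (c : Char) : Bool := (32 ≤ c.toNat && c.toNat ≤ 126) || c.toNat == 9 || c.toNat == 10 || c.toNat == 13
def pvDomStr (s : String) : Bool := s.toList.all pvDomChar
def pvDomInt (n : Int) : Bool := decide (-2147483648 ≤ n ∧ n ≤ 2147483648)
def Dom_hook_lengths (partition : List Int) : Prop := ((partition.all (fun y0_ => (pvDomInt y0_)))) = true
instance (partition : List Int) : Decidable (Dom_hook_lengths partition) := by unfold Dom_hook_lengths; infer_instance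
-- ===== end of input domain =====

-- B replaces A's per-cell rescan of the suffix by one sort of the suffix per row
-- plus a pointer sweep; objective: faster (asymptotically fewer suffix scans).

-- ===== PORT A =====
-- literal transliteration of A: nested loops; the leg is a counting fold over range(i+1, n)
def hook_lengths (partition : List Int) : List Int :=
  let n : Int := partition.length
  (PySem.List.pyRange 0 n 1).foldl (fun hooks i =>
    (PySem.List.pyRange 0 (PySem.List.pyGetD partition i 0) 1).foldl (fun hooks j =>
      let arm := PySem.List.pyGetD partition i 0 - j - 1
      let leg := (PySem.List.pyRange (i+1) n 1).foldl
        (fun acc k => if PySem.List.pyGetD partition k 0 > j then acc + 1 else acc) (0 : Int)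
      hooks ++ [arm + leg + 1]) hooks) []

-- ===== PORT B =====
-- the 'while p < L and tail[p] <= j: p += 1' loop of Source B
def pvAdvance (S : List Int) (j : Int) (p : Nat) : Nat :=
  if h : p < S.length then
    if S[p]'h ≤ j then pvAdvance S j (p + 1) else p
  else p
termination_by S.length - p
decreasing_by omega

-- literal transliteration of Source B: per row sort the suffix, sweep pointer p over it
def hook_lengths_alt (partition : List Int) : List Int :=
  let n : Int := partition.length
  (PySem.List.pyRange 0 n 1).foldl (fun hooks i =>
    let m := PySem.List.pyGetD partition i 0
    let tail := PySem.List.sorted (PySem.List.slice partition (some (i+1)) none) id false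
    let L : Int := tail.length
    ((PySem.List.pyRange 0 m 1).foldl (fun (st : Nat × List Int) j =>
        let p := pvAdvance tail j st.1
        (p, st.2 ++ [m - j + L - p])) (0, hooks)).2) []

-- ===== PRECONDITION & SPEC =====
def Spec_hook_lengths (partition : List Int) (out : List Int) : Prop := out = hook_lengths_alt partition
instance (partition : List Int) (out : List Int) : Decidable (Spec_hook_lengths partition out) := by unfold Spec_hook_lengths; infer_instance

-- ===== CLAIM (what is proved, stated in full; the proofs are below) =====
def Claim_equal_hook_lengths : Prop := ∀ (partition : List Int), Dom_hook_lengths partition → Spec_hook_lengths partition (hook_lengths partition)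

-- ===== LEMMAS AND PROOFS =====

-- the while loop advances the pointer past exactly the prefix of elements ≤ j
theorem pvAdvance_eq (S : List Int) (j : Int) (p : Nat) :
    pvAdvance S j p = p + ((S.drop p).takeWhile (fun v => decide (v ≤ j))).length := by
  unfold pvAdvance
  by_cases hp : p < S.length
  · have hd : S.drop p = S[p]'hp :: S.drop (p + 1) := List.drop_eq_getElem_cons hp
    rw [hd, List.takeWhile_cons]
    by_cases hle : S[p]'hp ≤ j
    · rw [dif_pos hp, if_pos hle, pvAdvance_eq S j (p + 1)]
      simp [hle]
      omega
    · rw [dif_pos hp, if_neg hle]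
      simp [hle]
  · rw [dif_neg hp, List.drop_eq_nil_of_le (by omega)]
    simp
termination_by S.length - p
decreasing_by omega

-- a takeWhile with a weaker predicate splits at the boundary of the stronger one
theorem takeWhile_split {α : Type} (q p : α → Bool) (hqp : ∀ x, q x = true → p x = true) :
    ∀ (l : List α), l.takeWhile p = l.takeWhile q ++ (l.drop (l.takeWhile q).length).takeWhile p
  | [] => by simp
  | x :: xs => by
    by_cases hq : q x = true
    · simp [List.takeWhile_cons, hq, hqp x hq, takeWhile_split q p hqp xs]
    · simp [List.takeWhile_cons, hq]

-- on a sorted list the ≤-prefix length is the ≤-count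
theorem sorted_takeWhile_length_eq_countP (j : Int) :
    ∀ (S : List Int), S.Pairwise (· ≤ ·) →
      (S.takeWhile (fun v => decide (v ≤ j))).length = S.countP (fun v => decide (v ≤ j))
  | [], _ => by simp
  | x :: xs, h => by
    rcases List.pairwise_cons.mp h with ⟨hall, htail⟩
    by_cases hx : x ≤ j
    · simp [List.takeWhile_cons, List.countP_cons, hx,
        sorted_takeWhile_length_eq_countP j xs htail]
    · have : xs.countP (fun v => decide (v ≤ j)) = 0 := by
        rw [List.countP_eq_zero]
        intro v hv
        simp only [decide_eq_true_eq]
        have := hall v hv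
        omega
      simp [List.takeWhile_cons, List.countP_cons, hx, this]

-- starting from the ≤-a prefix length, the sweep lands on the ≤-j prefix length (a ≤ j)
theorem pvAdvance_from_tw (S : List Int) (a j : Int) (haj : a ≤ j) :
    pvAdvance S j (S.takeWhile (fun v => decide (v ≤ a))).length
      = (S.takeWhile (fun v => decide (v ≤ j))).length := by
  rw [pvAdvance_eq]
  rw [takeWhile_split (fun v => decide (v ≤ a)) (fun v => decide (v ≤ j))
    (by intro x hx; simp only [decide_eq_true_eq] at *; omega) S]
  simp

-- B's inner fold, characterised: it emits one entry per column using prefix lengths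
theorem rowB_fold (S : List Int) (m L : Int) :
    ∀ (c : Nat) (b : Int) (acc : List Int) (p : Nat),
      (∀ j, b ≤ j → pvAdvance S j p = (S.takeWhile (fun v => decide (v ≤ j))).length) →
      ((PySem.List.pyRange b (b + c) 1).foldl (fun (st : Nat × List Int) j =>
          let p := pvAdvance S j st.1
          (p, st.2 ++ [m - j + L - p])) (p, acc)).2
        = acc ++ (PySem.List.pyRange b (b + c) 1).map
            (fun j => m - j + L - (S.takeWhile (fun v => decide (v ≤ j))).length)
  | 0, b, acc, p, _ => by
    simp [PySem.List.pyRange_one_eq_nil (by omega : b + (0:Nat) ≤ b)]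
  | c + 1, b, acc, p, hp => by
    have hcons : PySem.List.pyRange b (b + (c + 1 : Nat)) 1
        = b :: PySem.List.pyRange (b + 1) (b + 1 + c) 1 := by
      rw [PySem.List.pyRange_one_cons (by push_cast; omega)]
      congr 1
      push_cast
      ring_nf
    rw [hcons]
    simp only [List.foldl_cons, List.map_cons]
    rw [hp b le_rfl]
    rw [rowB_fold S m L c (b + 1)
      (acc ++ [m - b + L - ((S.takeWhile (fun v => decide (v ≤ b))).length : Nat)])
      (S.takeWhile (fun v => decide (v ≤ b))).length
      (by intro j hj; exact pvAdvance_from_tw S b j (by omega))]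
    simp

-- flatMap congruence under membership
theorem flatMap_congr_mem {α β : Type} (f g : α → List β) :
    ∀ (l : List α), (∀ x ∈ l, f x = g x) → l.flatMap f = l.flatMap g
  | [], _ => rfl
  | x :: xs, h => by
    simp only [List.flatMap_cons]
    rw [h x (by simp), flatMap_congr_mem f g xs (fun y hy => h y (by simp [hy]))]

-- ≤-count plus >-count is the length
theorem countP_le_add_gt (j : Int) :
    ∀ (S : List Int), S.countP (fun v => decide (v ≤ j)) + S.countP (fun v => decide (v > j))
      = S.length
  | [] => by simp
  | x :: xs => by
    have ih := countP_le_add_gt j xs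
    simp only [List.countP_cons, List.length_cons, decide_eq_true_eq]
    by_cases hx : x ≤ j
    · rw [if_pos hx, if_neg (by omega : ¬ (x > j))]
      omega
    · rw [if_neg hx, if_pos (by omega : x > j)]
      omega

-- the per-row outputs of the two ports agree for every row index 0 ≤ i
theorem row_eq (partition : List Int) (i : Int) (hi : 0 ≤ i) :
    (PySem.List.pyRange 0 (PySem.List.pyGetD partition i 0) 1).map (fun j =>
        PySem.List.pyGetD partition i 0 - j - 1 +
          ((0 : Int) + ((partition.drop (i+1).toNat).countP (fun v => decide (v > j)) : Int)) + 1)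
      = (PySem.List.pyRange 0 (PySem.List.pyGetD partition i 0) 1).map (fun j =>
          PySem.List.pyGetD partition i 0 - j +
            ((PySem.List.sorted (partition.drop (i+1).toNat) id false).length : Int) -
            ((PySem.List.sorted (partition.drop (i+1).toNat) id false).takeWhile
              (fun v => decide (v ≤ j))).length) := by
  apply List.map_congr_left
  intro j hj
  set D := partition.drop (i+1).toNat with hD
  set S := PySem.List.sorted D id false with hS
  have hpw : S.Pairwise (· ≤ ·) := by
    have := PySem.List.sorted_pairwise (xs := D) (key := id)
    simpa using this
  have hperm : S.Perm D := PySem.List.sorted_perm D id false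
  have hlen : S.length = D.length := hperm.length_eq
  have hcount : S.countP (fun v => decide (v > j)) = D.countP (fun v => decide (v > j)) :=
    hperm.countP_eq _
  have htw := sorted_takeWhile_length_eq_countP j S hpw
  have hsplit : S.countP (fun v => decide (v ≤ j)) + S.countP (fun v => decide (v > j))
      = S.length := countP_le_add_gt j S
  rw [htw]
  omega

-- A as a flatMap of per-row maps
theorem hook_lengths_eq_flatMap (partition : List Int) :
    hook_lengths partition = (PySem.List.pyRange 0 partition.length 1).flatMap (fun i =>
      (PySem.List.pyRange 0 (PySem.List.pyGetD partition i 0) 1).map (fun j =>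
        PySem.List.pyGetD partition i 0 - j - 1 +
          ((0 : Int) + ((partition.drop (i+1).toNat).countP (fun v => decide (v > j)) : Int)) + 1)) := by
  unfold hook_lengths
  rw [PySem.List.foldl_congr_mem
    (g := fun hooks i => hooks ++
      (PySem.List.pyRange 0 (PySem.List.pyGetD partition i 0) 1).map (fun j =>
        PySem.List.pyGetD partition i 0 - j - 1 +
          ((0 : Int) + ((partition.drop (i+1).toNat).countP (fun v => decide (v > j)) : Int)) + 1))]
  · rw [PySem.List.foldl_append_eq_flatMap]
    simp
  · intro acc i hi
    have h0i : 0 ≤ i := (PySem.List.mem_pyRange_one.mp hi).1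
    rw [PySem.List.foldl_congr_mem
      (g := fun hooks j => hooks ++
        [PySem.List.pyGetD partition i 0 - j - 1 +
          ((0 : Int) + ((partition.drop (i+1).toNat).countP (fun v => decide (v > j)) : Int)) + 1])]
    · rw [PySem.List.foldl_append_singleton_eq_map]
    · intro acc' j hj
      have hleg : (PySem.List.pyRange (i+1) (partition.length : Int) 1).foldl
          (fun acc k => if PySem.List.pyGetD partition k 0 > j then acc + 1 else acc) (0 : Int)
          = (0 : Int) + ((partition.drop (i+1).toNat).countP (fun v => decide (v > j)) : Int) := by
        rw [PySem.List.foldl_pyRange_pyGetD' (xs := partition) (d := 0)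
          (f := fun acc v => if v > j then acc + 1 else acc) (init := (0:Int)) (by omega)]
        exact PySem.List.foldl_ite_add_one _ _ _
      simp only [hleg]
  done

-- B as a flatMap of per-row maps
theorem hook_lengths_alt_eq_flatMap (partition : List Int) :
    hook_lengths_alt partition = (PySem.List.pyRange 0 partition.length 1).flatMap (fun i =>
      (PySem.List.pyRange 0 (PySem.List.pyGetD partition i 0) 1).map (fun j =>
        PySem.List.pyGetD partition i 0 - j +
          ((PySem.List.sorted (partition.drop (i+1).toNat) id false).length : Int) -
          ((PySem.List.sorted (partition.drop (i+1).toNat) id false).takeWhile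
            (fun v => decide (v ≤ j))).length)) := by
  unfold hook_lengths_alt
  rw [PySem.List.foldl_congr_mem
    (g := fun hooks i => hooks ++
      (PySem.List.pyRange 0 (PySem.List.pyGetD partition i 0) 1).map (fun j =>
        PySem.List.pyGetD partition i 0 - j +
          ((PySem.List.sorted (partition.drop (i+1).toNat) id false).length : Int) -
          ((PySem.List.sorted (partition.drop (i+1).toNat) id false).takeWhile
            (fun v => decide (v ≤ j))).length))]
  · rw [PySem.List.foldl_append_eq_flatMap]
    simp
  · intro acc i hi
    have h0i : 0 ≤ i := (PySem.List.mem_pyRange_one.mp hi).1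
    have hslice : PySem.List.slice partition (some (i+1)) none = partition.drop (i+1).toNat :=
      PySem.List.slice_from partition (by omega : (0:Int) ≤ i + 1)
    simp only [hslice]
    set m := PySem.List.pyGetD partition i 0 with hm
    set S := PySem.List.sorted (partition.drop (i+1).toNat) id false with hS
    by_cases hmpos : 0 < m
    · have hrange : PySem.List.pyRange 0 m 1 = PySem.List.pyRange 0 ((0:Int) + (m.toNat : Nat)) 1 := by
        congr 1
        push_cast
        omega
      rw [hrange, rowB_fold S m (S.length : Int) m.toNat 0 acc 0
        (by intro j _; rw [pvAdvance_eq]; simp)]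
    · have hnil : PySem.List.pyRange 0 m 1 = [] := PySem.List.pyRange_one_eq_nil (by omega)
      simp [hnil]

-- ===== VERDICT (by name: the statement is the Claim_ definition above) =====
theorem hook_lengths_spec : Claim_equal_hook_lengths := by
  intro partition _
  unfold Spec_hook_lengths
  rw [hook_lengths_eq_flatMap, hook_lengths_alt_eq_flatMap]
  apply flatMap_congr_mem
  intro i hi
  exact row_eq partition i (PySem.List.mem_pyRange_one.mp hi).1
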